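-- pv_equiv track=rewrite | github.com/mengjihua/Binary-Battle | 周赛/第 460 场周赛/q2.py | numOfSubsequences
-- ===== SOURCE A (Python) =====
-- def numOfSubsequences(s: str) -> int:
--     set_s = set(s)
--     if ('L' not in set_s and 'C' not in set_s) or ('C' not in set_s and 'T' not in set_s) or ('L' not in set_s and 'T' not in set_s):
--         return 0
--     n = len(s)
--
--     pre_L = [0] * (n + 1)
--     for i in range(n):
--         pre_L[i + 1] = pre_L[i] + (1 if s[i] == 'L' else 0)
--
--     suf_T = [0] * (n + 1)
--     for i in range(n - 1, -1, -1):
--         suf_T[i] = suf_T[i + 1] + (1 if s[i] == 'T' else 0)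
--
--     LCT_num = 0
--     for i in range(n):
--         if s[i] == 'C':
--             LCT_num += pre_L[i] * suf_T[i]
--
--     best = LCT_num
--
--     add_L = 0
--     for i in range(n):
--         if s[i] == 'C':
--             add_L += suf_T[i]
--     best = max(best, LCT_num + add_L)
--
--     add_T = 0
--     for i in range(n):
--         if s[i] == 'C':
--             add_T += pre_L[i]
--     best = max(best, LCT_num + add_T)
--
--     add_C = 0
--     for i in range(n + 1):
--         L_num = pre_L[i]
--         T_num = suf_T[i]
--         add_C = max(add_C, L_num * T_num)
--     best = max(best, LCT_num + add_C)
--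
--     return best
-- ===== SOURCE B (Python) =====
-- def numOfSubsequences(s: str) -> int:
--     # One left-to-right pass with running counters; no prefix/suffix arrays.
--     t_rem = sum(ch == 'T' for ch in s)
--     cl = clc = clct = cct = best_c = 0
--     for ch in s:
--         if ch == 'T':
--             t_rem -= 1
--             clct += clc
--         elif ch == 'C':
--             clc += cl
--             cct += t_rem
--         elif ch == 'L':
--             cl += 1
--         if cl * t_rem > best_c:
--             best_c = cl * t_rem
--     return clct + max(0, cct, clc, best_c)
-- ===== Notes on version B (the rewrite author's own statement) =====
-- stated objective: faster
-- what changed: Replaced the five separate passes with prefix/suffix count arrays by one left-to-right pass over the string maintaining running counters (T-remaining, L-count, LC-pairs, LCT-triples, CT-pairs, and a running max L*T over split points), dropping the redundant missing-letter guard.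
import Mathlib
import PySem

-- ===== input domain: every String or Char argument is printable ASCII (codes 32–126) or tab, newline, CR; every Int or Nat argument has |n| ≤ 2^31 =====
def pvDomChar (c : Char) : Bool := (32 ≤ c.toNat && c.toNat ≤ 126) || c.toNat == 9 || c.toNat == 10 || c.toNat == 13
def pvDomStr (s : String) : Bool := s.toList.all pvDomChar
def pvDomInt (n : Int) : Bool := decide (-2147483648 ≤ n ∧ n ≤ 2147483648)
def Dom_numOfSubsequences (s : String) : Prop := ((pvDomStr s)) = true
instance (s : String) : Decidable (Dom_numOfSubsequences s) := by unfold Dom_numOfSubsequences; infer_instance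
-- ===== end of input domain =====

-- B replaces A's five passes over the string and its two auxiliary prefix/suffix arrays by ONE
-- left-to-right pass with running counters (objective: faster by a constant factor;
-- equal return value on every input, proved below).

-- ===== PORT A =====
-- Literal port of A: set-membership guard, prefix-L / suffix-T arrays built by index loops
-- (all list indices are in range, so `getD _ 0` / `getD _ ' '` is exact for Python's indexing),
-- then four index loops accumulating LCT_num / add_L / add_T / add_C and the running `best`.
def numOfSubsequences (s : String) : Int :=
  let l := s.toList
  let setS := PySem.Set.ofList l
  if (!(PySem.Set.contains setS 'L') && !(PySem.Set.contains setS 'C')) ||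
     (!(PySem.Set.contains setS 'C') && !(PySem.Set.contains setS 'T')) ||
     (!(PySem.Set.contains setS 'L') && !(PySem.Set.contains setS 'T')) then 0
  else
    let n := l.length
    let preL := (List.range n).foldl
      (fun a i => a.set (i + 1) (a.getD i 0 + (if l.getD i ' ' = 'L' then 1 else 0)))
      (List.replicate (n + 1) (0 : Int))
    let sufT := ((List.range n).reverse).foldl
      (fun a i => a.set i (a.getD (i + 1) 0 + (if l.getD i ' ' = 'T' then 1 else 0)))
      (List.replicate (n + 1) (0 : Int))
    let lctNum := (List.range n).foldl
      (fun acc i => if l.getD i ' ' = 'C' then acc + preL.getD i 0 * sufT.getD i 0 else acc) 0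
    let best := lctNum
    let addL := (List.range n).foldl
      (fun acc i => if l.getD i ' ' = 'C' then acc + sufT.getD i 0 else acc) 0
    let best := max best (lctNum + addL)
    let addT := (List.range n).foldl
      (fun acc i => if l.getD i ' ' = 'C' then acc + preL.getD i 0 else acc) 0
    let best := max best (lctNum + addT)
    let addC := (List.range (n + 1)).foldl
      (fun acc i => max acc (preL.getD i 0 * sufT.getD i 0)) 0
    let best := max best (lctNum + addC)
    best

-- ===== PORT B =====
-- One step of B's single loop on the state (t_rem, cl, clc, clct, cct, best_c).
def bStep (st : Int × Int × Int × Int × Int × Int) (ch : Char) : Int × Int × Int × Int × Int × Int :=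
  match st with
  | (t, cl, clc, clct, cct, bc) =>
    let s5 : Int × Int × Int × Int × Int :=
      if ch = 'T' then (t - 1, cl, clc, clct + clc, cct)
      else if ch = 'C' then (t, cl, clc + cl, clct, cct + t)
      else if ch = 'L' then (t, cl + 1, clc, clct, cct)
      else (t, cl, clc, clct, cct)
    match s5 with
    | (t, cl, clc, clct, cct) =>
      (t, cl, clc, clct, cct, if cl * t > bc then cl * t else bc)

def numOfSubsequences_alt (s : String) : Int :=
  let tTotal : Int := s.toList.foldl (fun acc ch => acc + (if ch = 'T' then 1 else 0)) 0
  match s.toList.foldl bStep (tTotal, 0, 0, 0, 0, 0) with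
  | (_, _, clc, clct, cct, bc) => clct + max (max (max 0 cct) clc) bc

-- ===== PRECONDITION & SPEC =====
def Spec_numOfSubsequences (s : String) (out : Int) : Prop := out = numOfSubsequences_alt s
instance (s : String) (out : Int) : Decidable (Spec_numOfSubsequences s out) := by unfold Spec_numOfSubsequences; infer_instance

-- ===== CLAIM (what is proved, stated in full; the proofs are below) =====
def Claim_equal_numOfSubsequences : Prop := ∀ (s : String), Dom_numOfSubsequences s → Spec_numOfSubsequences s (numOfSubsequences s)

-- ===== LEMMAS AND PROOFS =====

/-- number of occurrences of `c`, as an `Int` -/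
def pcnt (c : Char) : List Char → Int
  | [] => 0
  | x :: xs => (if x = c then 1 else 0) + pcnt c xs

/-- ordered pairs: an `a` strictly before a `b` -/
def sPair (a b : Char) : List Char → Int
  | [] => 0
  | x :: xs => (if x = a then pcnt b xs else 0) + sPair a b xs

/-- ordered triples L < C < T -/
def sLCT : List Char → Int
  | [] => 0
  | x :: xs => (if x = 'L' then sPair 'C' 'T' xs else 0) + sLCT xs

/-- B's running best_c as a recursion over the remaining characters -/
def bcG (cl t : Int) : List Char → Int → Int
  | [], bc => bc
  | x :: xs, bc =>
      bcG (cl + (if x = 'L' then 1 else 0)) (t - (if x = 'T' then 1 else 0)) xs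
        (if (cl + (if x = 'L' then 1 else 0)) * (t - (if x = 'T' then 1 else 0)) > bc
         then (cl + (if x = 'L' then 1 else 0)) * (t - (if x = 'T' then 1 else 0)) else bc)

theorem pcnt_nonneg (c : Char) (l : List Char) : 0 ≤ pcnt c l := by
  induction l with
  | nil => simp [pcnt]
  | cons x xs ih => simp only [pcnt]; split <;> omega

theorem pcnt_append (c : Char) (l r : List Char) : pcnt c (l ++ r) = pcnt c l + pcnt c r := by
  induction l with
  | nil => simp [pcnt]
  | cons x xs ih => simp only [List.cons_append, pcnt, ih]; ring

theorem sPair_append (a b : Char) (l r : List Char) :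
    sPair a b (l ++ r) = sPair a b l + pcnt a l * pcnt b r + sPair a b r := by
  induction l with
  | nil => simp [sPair, pcnt]
  | cons x xs ih =>
      simp only [List.cons_append, sPair, pcnt, pcnt_append, ih]
      split <;> ring

theorem sLCT_append (l r : List Char) :
    sLCT (l ++ r) = sLCT l + sPair 'L' 'C' l * pcnt 'T' r + pcnt 'L' l * sPair 'C' 'T' r + sLCT r := by
  induction l with
  | nil => simp [sLCT, sPair, pcnt]
  | cons x xs ih =>
      simp only [List.cons_append, sLCT, sPair, pcnt, sPair_append, ih]
      split <;> ring

theorem pcnt_take_le (c : Char) (l : List Char) (j : Nat) : pcnt c (l.take j) ≤ pcnt c l := by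
  have h := pcnt_append c (l.take j) (l.drop j)
  rw [List.take_append_drop] at h
  have := pcnt_nonneg c (l.drop j)
  omega

theorem pcnt_drop (c : Char) (l : List Char) (j : Nat) :
    pcnt c (l.drop j) = pcnt c l - pcnt c (l.take j) := by
  have h := pcnt_append c (l.take j) (l.drop j)
  rw [List.take_append_drop] at h
  omega

theorem pcnt_eq_zero (c : Char) (l : List Char) (h : c ∉ l) : pcnt c l = 0 := by
  induction l with
  | nil => rfl
  | cons x xs ih =>
      simp only [List.mem_cons, not_or] at h
      simp [pcnt, ih h.2, Ne.symm h.1]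

theorem sPair_zero_left (a b : Char) (l : List Char) (h : pcnt a l = 0) : sPair a b l = 0 := by
  induction l with
  | nil => rfl
  | cons x xs ih =>
      simp only [pcnt] at h
      have hx : pcnt a xs = 0 := by have := pcnt_nonneg a xs; split at h <;> omega
      have hxa : ¬ x = a := by intro hh; rw [if_pos hh] at h; have := pcnt_nonneg a xs; omega
      simp [sPair, hxa, ih hx]

theorem sPair_zero_right (a b : Char) (l : List Char) (h : pcnt b l = 0) : sPair a b l = 0 := by
  induction l with
  | nil => rfl
  | cons x xs ih =>
      simp only [pcnt] at h
      have hx : pcnt b xs = 0 := by have := pcnt_nonneg b xs; split at h <;> omega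
      simp only [sPair, ih hx]
      split <;> simp [hx]

theorem sLCT_zero_noL (l : List Char) (h : pcnt 'L' l = 0) : sLCT l = 0 := by
  induction l with
  | nil => rfl
  | cons x xs ih =>
      simp only [pcnt] at h
      have hx : pcnt 'L' xs = 0 := by have := pcnt_nonneg 'L' xs; split at h <;> omega
      have hxa : ¬ x = 'L' := by intro hh; rw [if_pos hh] at h; have := pcnt_nonneg 'L' xs; omega
      simp [sLCT, hxa, ih hx]

theorem sLCT_zero_noC (l : List Char) (h : pcnt 'C' l = 0) : sLCT l = 0 := by
  induction l with
  | nil => rfl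
  | cons x xs ih =>
      simp only [pcnt] at h
      have hx : pcnt 'C' xs = 0 := by have := pcnt_nonneg 'C' xs; split at h <;> omega
      simp only [sLCT, ih hx, sPair_zero_left 'C' 'T' xs hx]
      split <;> simp

theorem sCT_add_sTC (l : List Char) :
    sPair 'C' 'T' l + sPair 'T' 'C' l = pcnt 'C' l * pcnt 'T' l := by
  induction l with
  | nil => simp [sPair, pcnt]
  | cons x xs ih =>
      simp only [sPair, pcnt]
      by_cases hC : x = 'C'
      · have hT : ¬ x = 'T' := by subst hC; decide
        simp only [if_pos hC, if_neg hT]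
        nlinarith [ih]
      · by_cases hT : x = 'T'
        · simp only [if_neg hC, if_pos hT]; nlinarith [ih]
        · simp only [if_neg hC, if_neg hT]; nlinarith [ih]

/-- partial sums over `List.range` -/
def rSum (g : Nat → Int) (j : Nat) : Int := ((List.range j).map g).sum

theorem rSum_succ (g : Nat → Int) (j : Nat) : rSum g (j + 1) = rSum g j + g j := by
  simp [rSum, List.range_succ]

theorem rSum_take (c : Char) (l : List Char) :
    ∀ j, j ≤ l.length →
      rSum (fun i => if l.getD i ' ' = c then 1 else 0) j = pcnt c (l.take j) := by
  intro j hj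
  induction j with
  | zero => simp [rSum, pcnt]
  | succ j ih =>
      rw [rSum_succ, ih (by omega)]
      have hjl : j < l.length := by omega
      have hg : l[j]? = some l[j] := List.getElem?_eq_getElem hjl
      rw [List.take_succ, pcnt_append, hg]
      simp only [Option.toList_some]
      have hgd : l.getD j ' ' = l[j] := by simp [List.getD, hg]
      rw [hgd]
      simp [pcnt]

/-- the ascending fill loop building `pre_L` -/
theorem fill_up (g : Nat → Int) (N : Nat) :
    ∀ n, n ≤ N →
      (((List.range n).foldl (fun a i => a.set (i + 1) (a.getD i 0 + g i))
          (List.replicate (N + 1) (0 : Int))).length = N + 1) ∧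
      (∀ j, ((List.range n).foldl (fun a i => a.set (i + 1) (a.getD i 0 + g i))
          (List.replicate (N + 1) (0 : Int))).getD j 0 = if j ≤ n then rSum g j else 0) := by
  intro n hn
  induction n with
  | zero =>
      refine ⟨by simp, ?_⟩
      intro j
      simp only [List.range_zero, List.foldl_nil]
      by_cases hj : j ≤ 0
      · interval_cases j; simp [rSum]
      · simp [hj, List.getD]
  | succ n ih =>
      obtain ⟨hlen, hval⟩ := ih (by omega)
      rw [List.range_succ, List.foldl_append, List.foldl_cons, List.foldl_nil]
      set R := (List.range n).foldl (fun a i => a.set (i + 1) (a.getD i 0 + g i))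
          (List.replicate (N + 1) (0 : Int)) with hR
      constructor
      · simp [hlen]
      · intro j
        have hRn : R.getD n 0 = rSum g n := by rw [hval n]; simp
        have hlt : n + 1 < R.length := by omega
        by_cases hj : j = n + 1
        · subst hj
          simp only [List.getD, List.getElem?_set, if_pos rfl, hlt, if_true]
          simp only [List.getD] at hRn
          simp [hRn, rSum_succ]
        · have hset : (R.set (n + 1) (R.getD n 0 + g n)).getD j 0 = R.getD j 0 := by
            simp only [List.getD, List.getElem?_set]
            rw [if_neg (by omega)]
          rw [hset, hval j]
          by_cases h1 : j ≤ n
          · rw [if_pos h1, if_pos (by omega)]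
          · rw [if_neg h1, if_neg (by omega)]

/-- the descending fill loop building `suf_T` -/
theorem fill_down (g : Nat → Int) :
    ∀ n (a : List Int), n < a.length →
      ((((List.range n).reverse).foldl (fun b i => b.set i (b.getD (i + 1) 0 + g i)) a).length
          = a.length) ∧
      (∀ j, (((List.range n).reverse).foldl (fun b i => b.set i (b.getD (i + 1) 0 + g i)) a).getD j 0
          = if j < n then (rSum g n - rSum g j) + a.getD n 0 else a.getD j 0) := by
  intro n
  induction n with
  | zero =>
      intro a _
      refine ⟨rfl, ?_⟩
      intro j; simp
  | succ n ih =>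
      intro a ha
      have hrev : (List.range (n + 1)).reverse = n :: (List.range n).reverse := by
        simp [List.range_succ]
      rw [hrev, List.foldl_cons]
      set b := a.set n (a.getD (n + 1) 0 + g n) with hb
      have hblen : b.length = a.length := by simp [hb]
      obtain ⟨hlen, hval⟩ := ih b (by omega)
      refine ⟨by rw [hlen, hblen], ?_⟩
      intro j
      rw [hval j]
      have hbn : b.getD n 0 = a.getD (n + 1) 0 + g n := by
        have hna : n < a.length := by omega
        simp [hb, List.getD, List.getElem?_set, hna]
      have hbj : ∀ k, k ≠ n → b.getD k 0 = a.getD k 0 := by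
        intro k hk
        simp only [hb, List.getD, List.getElem?_set]
        rw [if_neg (by omega)]
      by_cases hj : j < n
      · rw [if_pos hj, if_pos (by omega), hbn, rSum_succ]; ring
      · rw [if_neg hj]
        by_cases hj2 : j = n
        · subst hj2
          rw [if_pos (by omega), hbn, rSum_succ]; ring
        · rw [if_neg (by omega), hbj j (by omega)]

/-- a guarded accumulating index loop is a sum -/
theorem foldl_guard_add (P : Nat → Prop) [DecidablePred P] (h : Nat → Int) :
    ∀ (xs : List Nat) (acc : Int),
      xs.foldl (fun a i => if P i then a + h i else a) acc
        = acc + (xs.map (fun i => if P i then h i else 0)).sum := by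
  intro xs
  induction xs with
  | nil => simp
  | cons x xs ih =>
      intro acc
      simp only [List.foldl_cons, List.map_cons, List.sum_cons, ih]
      split <;> ring

theorem foldl_max_zero (f : Nat → Int) :
    ∀ (xs : List Nat), (∀ i ∈ xs, f i = 0) →
      xs.foldl (fun a i => max a (f i)) 0 = 0 := by
  intro xs
  induction xs with
  | nil => intro _; rfl
  | cons x xs ih =>
      intro h
      simp only [List.foldl_cons, h x (by simp), max_self]
      exact ih (fun i hi => h i (by simp [hi]))

theorem sum_guard_PL (l : List Char) :
    ((List.range l.length).map
        (fun i => if l.getD i ' ' = 'C' then pcnt 'L' (l.take i) else 0)).sum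
      = sPair 'L' 'C' l := by
  induction l using List.reverseRecOn with
  | nil => simp [sPair]
  | append_singleton l x ih =>
      rw [List.length_append, List.length_singleton, List.range_succ, List.map_append,
        List.sum_append]
      have hcongr :
          ((List.range l.length).map
              (fun i => if (l ++ [x]).getD i ' ' = 'C' then pcnt 'L' ((l ++ [x]).take i) else 0))
            = ((List.range l.length).map
              (fun i => if l.getD i ' ' = 'C' then pcnt 'L' (l.take i) else 0)) := by
        apply List.map_congr_left
        intro i hi
        rw [List.mem_range] at hi
        rw [List.getD_append _ _ _ _ hi, List.take_append_of_le_length (by omega)]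
      rw [hcongr, ih, sPair_append]
      simp only [List.map_cons, List.map_nil, List.sum_cons, List.sum_nil]
      rw [List.getD_append_right _ _ _ _ (by omega), List.take_append_of_le_length (by omega)]
      simp only [Nat.sub_self, List.take_length]
      have hg : [x].getD 0 ' ' = x := rfl
      rw [hg]
      by_cases hx : x = 'C'
      · simp [hx, pcnt, sPair]
      · simp [hx, pcnt, sPair]

theorem sum_guard_ST (l : List Char) :
    ((List.range l.length).map
        (fun i => if l.getD i ' ' = 'C' then pcnt 'T' (l.drop i) else 0)).sum
      = sPair 'C' 'T' l := by
  induction l using List.reverseRecOn with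
  | nil => simp [sPair]
  | append_singleton l x ih =>
      rw [List.length_append, List.length_singleton, List.range_succ, List.map_append,
        List.sum_append]
      have hcongr :
          ((List.range l.length).map
              (fun i => if (l ++ [x]).getD i ' ' = 'C' then pcnt 'T' ((l ++ [x]).drop i) else 0))
            = ((List.range l.length).map
              (fun i => (if l.getD i ' ' = 'C' then pcnt 'T' (l.drop i) else 0)
                + (if l.getD i ' ' = 'C' then (if x = 'T' then 1 else 0) else 0))) := by
        apply List.map_congr_left
        intro i hi
        rw [List.mem_range] at hi
        rw [List.getD_append _ _ _ _ hi, List.drop_append_of_le_length (by omega), pcnt_append]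
        simp only [pcnt, add_zero]
        split
        · rfl
        · simp
      rw [hcongr, List.sum_map_add, ih]
      have h2 : ((List.range l.length).map
          (fun i => if l.getD i ' ' = 'C' then (if x = 'T' then 1 else 0) else (0:Int))).sum
          = (if x = 'T' then 1 else 0) * pcnt 'C' (l.take l.length) := by
        rw [← rSum_take 'C' l l.length (le_refl _)]
        unfold rSum
        induction (List.range l.length) with
        | nil => simp
        | cons y ys ihy =>
            simp only [List.map_cons, List.sum_cons, ihy]
            split <;> ring
      rw [h2, List.take_length, sPair_append]
      simp only [List.map_cons, List.map_nil, List.sum_cons, List.sum_nil]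
      rw [List.getD_append_right _ _ _ _ (by omega), List.drop_append_of_le_length (by omega)]
      simp only [Nat.sub_self, List.drop_length]
      have hg : [x].getD 0 ' ' = x := rfl
      rw [hg]
      by_cases hx : x = 'C'
      · have hxt : ¬ x = 'T' := by subst hx; decide
        simp [hx, hxt, pcnt, sPair]
      · by_cases ht : x = 'T'
        · simp [hx, ht, pcnt, sPair]
        · simp [hx, ht, pcnt, sPair]

theorem sum_guard_PLST (l : List Char) :
    ((List.range l.length).map
        (fun i => if l.getD i ' ' = 'C' then pcnt 'L' (l.take i) * pcnt 'T' (l.drop i) else 0)).sum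
      = sLCT l := by
  induction l using List.reverseRecOn with
  | nil => simp [sLCT]
  | append_singleton l x ih =>
      rw [List.length_append, List.length_singleton, List.range_succ, List.map_append,
        List.sum_append]
      have hcongr :
          ((List.range l.length).map
              (fun i => if (l ++ [x]).getD i ' ' = 'C'
                then pcnt 'L' ((l ++ [x]).take i) * pcnt 'T' ((l ++ [x]).drop i) else 0))
            = ((List.range l.length).map
              (fun i => (if l.getD i ' ' = 'C' then pcnt 'L' (l.take i) * pcnt 'T' (l.drop i) else 0)
                + (if x = 'T' then 1 else 0)
                  * (if l.getD i ' ' = 'C' then pcnt 'L' (l.take i) else 0))) := by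
        apply List.map_congr_left
        intro i hi
        rw [List.mem_range] at hi
        rw [List.getD_append _ _ _ _ hi, List.take_append_of_le_length (by omega),
          List.drop_append_of_le_length (by omega), pcnt_append]
        simp only [pcnt, add_zero]
        split
        · ring
        · simp
      rw [hcongr, List.sum_map_add]
      have h2 : ((List.range l.length).map
          (fun i => (if x = 'T' then 1 else 0)
            * (if l.getD i ' ' = 'C' then pcnt 'L' (l.take i) else (0:Int)))).sum
          = (if x = 'T' then 1 else 0) * sPair 'L' 'C' l := by
        rw [← sum_guard_PL l]
        induction (List.range l.length) with
        | nil => simp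
        | cons y ys ihy =>
            simp only [List.map_cons, List.sum_cons, ihy]
            ring
      rw [ih, h2, sLCT_append]
      simp only [List.map_cons, List.map_nil, List.sum_cons, List.sum_nil]
      rw [List.getD_append_right _ _ _ _ (by omega), List.take_append_of_le_length (by omega),
        List.drop_append_of_le_length (by omega)]
      simp only [Nat.sub_self, List.take_length, List.drop_length]
      have hg : [x].getD 0 ' ' = x := rfl
      rw [hg]
      by_cases hx : x = 'C'
      · have hxt : ¬ x = 'T' := by subst hx; decide
        simp [hx, hxt, pcnt, sPair, sLCT]
      · by_cases ht : x = 'T'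
        · simp [hx, ht, pcnt, sPair, sLCT]
        · simp [hx, ht, pcnt, sPair, sLCT]

/-- B's loop, fully characterised -/
theorem bloop (r : List Char) :
    ∀ t cl clc clct cct bc,
      r.foldl bStep (t, cl, clc, clct, cct, bc)
        = (t - pcnt 'T' r, cl + pcnt 'L' r,
           clc + cl * pcnt 'C' r + sPair 'L' 'C' r,
           clct + clc * pcnt 'T' r + cl * sPair 'C' 'T' r + sLCT r,
           cct + t * pcnt 'C' r - sPair 'T' 'C' r,
           bcG cl t r bc) := by
  induction r with
  | nil => intro t cl clc clct cct bc; simp [pcnt, sPair, sLCT, bcG]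
  | cons x xs ih =>
      intro t cl clc clct cct bc
      rw [List.foldl_cons]
      by_cases hT : x = 'T'
      · subst hT
        rw [show bStep (t, cl, clc, clct, cct, bc) 'T'
              = (t - 1, cl, clc, clct + clc, cct,
                 if cl * (t - 1) > bc then cl * (t - 1) else bc) from rfl, ih]
        rw [show bcG cl t ('T' :: xs) bc
              = bcG cl (t - 1) xs (if cl * (t - 1) > bc then cl * (t - 1) else bc) from by
            simp [bcG]]
        simp [pcnt, sPair, sLCT, Prod.mk.injEq]
        all_goals try and_intros
        all_goals ring
      · by_cases hC : x = 'C'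
        · subst hC
          rw [show bStep (t, cl, clc, clct, cct, bc) 'C'
                = (t, cl, clc + cl, clct, cct + t,
                   if cl * t > bc then cl * t else bc) from rfl, ih]
          rw [show bcG cl t ('C' :: xs) bc
                = bcG cl t xs (if cl * t > bc then cl * t else bc) from by simp [bcG]]
          simp [pcnt, sPair, sLCT, Prod.mk.injEq]
          all_goals try and_intros
          all_goals ring
        · by_cases hL : x = 'L'
          · subst hL
            rw [show bStep (t, cl, clc, clct, cct, bc) 'L'
                  = (t, cl + 1, clc, clct, cct,
                     if (cl + 1) * t > bc then (cl + 1) * t else bc) from rfl, ih]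
            rw [show bcG cl t ('L' :: xs) bc
                  = bcG (cl + 1) t xs (if (cl + 1) * t > bc then (cl + 1) * t else bc) from by
                simp [bcG]]
            simp [pcnt, sPair, sLCT, Prod.mk.injEq]
            all_goals try and_intros
            all_goals ring
          · rw [show bStep (t, cl, clc, clct, cct, bc) x
                  = (t, cl, clc, clct, cct,
                     if cl * t > bc then cl * t else bc) from by simp [bStep, hT, hC, hL], ih]
            rw [show bcG cl t (x :: xs) bc
                  = bcG cl t xs (if cl * t > bc then cl * t else bc) from by
                simp [bcG, hT, hL]]
            simp [pcnt, sPair, sLCT, Prod.mk.injEq, hT, hC, hL]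
            all_goals try and_intros
            all_goals ring

/-- B's running max equals an index-loop running max over split points -/
theorem bcG_eq (r : List Char) :
    ∀ cl t bc,
      bcG cl t r bc
        = (List.range r.length).foldl
            (fun a i => max a ((cl + pcnt 'L' (r.take (i + 1))) * (t - pcnt 'T' (r.take (i + 1)))))
            bc := by
  induction r with
  | nil => intro cl t bc; simp [bcG]
  | cons x xs ih =>
      intro cl t bc
      have hmax : ∀ v b : Int, (if v > b then v else b) = max b v := by
        intro v b; rw [max_def]; split <;> split <;> omega
      simp only [bcG, hmax, List.length_cons, List.range_succ_eq_map, List.foldl_cons,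
        List.foldl_map]
      rw [ih]
      congr 1
      · funext a i
        simp only [Nat.succ_eq_add_one, List.take_succ_cons, pcnt]
        ring_nf
      · simp [List.take_succ_cons, pcnt]

theorem foldl_pcnt (c : Char) (l : List Char) :
    ∀ a : Int, l.foldl (fun acc ch => acc + (if ch = c then 1 else 0)) a = a + pcnt c l := by
  induction l with
  | nil => intro a; simp [pcnt]
  | cons x xs ih =>
      intro a
      simp only [List.foldl_cons, pcnt, ih]
      ring

theorem not_contains_of_guard (l : List Char) (c : Char)
    (h : PySem.Set.contains (PySem.Set.ofList l) c = false) : pcnt c l = 0 := by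
  apply pcnt_eq_zero
  intro hmem
  simp [PySem.Set.mem_ofList] at h
  exact h hmem

theorem bcG_zero_noL (l : List Char) (t : Int) (h : pcnt 'L' l = 0) : bcG 0 t l 0 = 0 := by
  rw [bcG_eq]
  apply foldl_max_zero
  intro i _
  have h1 : pcnt 'L' (l.take (i + 1)) = 0 :=
    le_antisymm (h ▸ pcnt_take_le 'L' l (i + 1)) (pcnt_nonneg _ _)
  rw [zero_add, h1, zero_mul]

theorem bcG_zero_noT (l : List Char) (h : pcnt 'T' l = 0) : bcG 0 (pcnt 'T' l) l 0 = 0 := by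
  rw [bcG_eq]
  apply foldl_max_zero
  intro i _
  have h1 : pcnt 'T' (l.take (i + 1)) = 0 :=
    le_antisymm (h ▸ pcnt_take_le 'T' l (i + 1)) (pcnt_nonneg _ _)
  rw [h, h1]; ring

/-- closed form of B -/
theorem alt_eq (s : String) :
    numOfSubsequences_alt s
      = sLCT s.toList
        + max (max (max 0 (pcnt 'T' s.toList * pcnt 'C' s.toList - sPair 'T' 'C' s.toList))
            (sPair 'L' 'C' s.toList))
          (bcG 0 (pcnt 'T' s.toList) s.toList 0) := by
  unfold numOfSubsequences_alt
  rw [foldl_pcnt, zero_add]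
  simp only [bloop]
  simp

/-- pointwise value of the `pre_L` array -/
theorem FU_getD (l : List Char) (i : Nat) (hi : i ≤ l.length) :
    ((List.range l.length).foldl
        (fun a i => a.set (i + 1) (a.getD i 0 + (if l.getD i ' ' = 'L' then 1 else 0)))
        (List.replicate (l.length + 1) (0 : Int))).getD i 0 = pcnt 'L' (l.take i) := by
  have h := (fill_up (fun j => if l.getD j ' ' = 'L' then 1 else 0) l.length l.length le_rfl).2 i
  rw [if_pos hi] at h
  rw [rSum_take 'L' l i hi] at h
  exact h

/-- pointwise value of the `suf_T` array -/
theorem FD_getD (l : List Char) (i : Nat) (hi : i ≤ l.length) :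
    (((List.range l.length).reverse).foldl
        (fun a i => a.set i (a.getD (i + 1) 0 + (if l.getD i ' ' = 'T' then 1 else 0)))
        (List.replicate (l.length + 1) (0 : Int))).getD i 0 = pcnt 'T' (l.drop i) := by
  have h := (fill_down (fun j => if l.getD j ' ' = 'T' then 1 else 0) l.length
      (List.replicate (l.length + 1) 0) (by simp)).2 i
  by_cases hlt : i < l.length
  · rw [if_pos hlt] at h
    rw [rSum_take 'T' l i (by omega)] at h
    rw [rSum_take 'T' l l.length le_rfl, List.take_length] at h
    rw [List.getD_replicate _ (by omega)] at h
    rw [h, pcnt_drop]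
    ring
  · have hi2 : i = l.length := by omega
    subst hi2
    rw [if_neg hlt] at h
    rw [List.getD_replicate _ (by omega)] at h
    rw [h, List.drop_length]
    rfl

theorem loop_lct (l : List Char) :
    (List.range l.length).foldl
      (fun acc i => if l.getD i ' ' = 'C'
        then acc + ((List.range l.length).foldl
            (fun a i => a.set (i + 1) (a.getD i 0 + (if l.getD i ' ' = 'L' then 1 else 0)))
            (List.replicate (l.length + 1) (0 : Int))).getD i 0
          * (((List.range l.length).reverse).foldl
            (fun a i => a.set i (a.getD (i + 1) 0 + (if l.getD i ' ' = 'T' then 1 else 0)))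
            (List.replicate (l.length + 1) (0 : Int))).getD i 0
        else acc) 0 = sLCT l := by
  rw [PySem.List.foldl_congr_mem (List.range l.length) _
      (fun acc i => if l.getD i ' ' = 'C' then acc + pcnt 'L' (l.take i) * pcnt 'T' (l.drop i)
        else acc) 0
      (by
        intro acc i hi
        rw [List.mem_range] at hi
        beta_reduce
        by_cases hc : l.getD i ' ' = 'C'
        · rw [if_pos hc, if_pos hc, FU_getD l i (by omega), FD_getD l i (by omega)]
        · rw [if_neg hc, if_neg hc])]
  rw [foldl_guard_add, zero_add]
  exact sum_guard_PLST l

theorem loop_addL (l : List Char) :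
    (List.range l.length).foldl
      (fun acc i => if l.getD i ' ' = 'C'
        then acc + (((List.range l.length).reverse).foldl
            (fun a i => a.set i (a.getD (i + 1) 0 + (if l.getD i ' ' = 'T' then 1 else 0)))
            (List.replicate (l.length + 1) (0 : Int))).getD i 0
        else acc) 0 = sPair 'C' 'T' l := by
  rw [PySem.List.foldl_congr_mem (List.range l.length) _
      (fun acc i => if l.getD i ' ' = 'C' then acc + pcnt 'T' (l.drop i) else acc) 0
      (by
        intro acc i hi
        rw [List.mem_range] at hi
        beta_reduce
        by_cases hc : l.getD i ' ' = 'C'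
        · rw [if_pos hc, if_pos hc, FD_getD l i (by omega)]
        · rw [if_neg hc, if_neg hc])]
  rw [foldl_guard_add, zero_add]
  exact sum_guard_ST l

theorem loop_addT (l : List Char) :
    (List.range l.length).foldl
      (fun acc i => if l.getD i ' ' = 'C'
        then acc + ((List.range l.length).foldl
            (fun a i => a.set (i + 1) (a.getD i 0 + (if l.getD i ' ' = 'L' then 1 else 0)))
            (List.replicate (l.length + 1) (0 : Int))).getD i 0
        else acc) 0 = sPair 'L' 'C' l := by
  rw [PySem.List.foldl_congr_mem (List.range l.length) _
      (fun acc i => if l.getD i ' ' = 'C' then acc + pcnt 'L' (l.take i) else acc) 0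
      (by
        intro acc i hi
        rw [List.mem_range] at hi
        beta_reduce
        by_cases hc : l.getD i ' ' = 'C'
        · rw [if_pos hc, if_pos hc, FU_getD l i (by omega)]
        · rw [if_neg hc, if_neg hc])]
  rw [foldl_guard_add, zero_add]
  exact sum_guard_PL l

theorem loop_addC (l : List Char) :
    (List.range (l.length + 1)).foldl
      (fun acc i => max acc
        (((List.range l.length).foldl
            (fun a i => a.set (i + 1) (a.getD i 0 + (if l.getD i ' ' = 'L' then 1 else 0)))
            (List.replicate (l.length + 1) (0 : Int))).getD i 0
          * (((List.range l.length).reverse).foldl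
            (fun a i => a.set i (a.getD (i + 1) 0 + (if l.getD i ' ' = 'T' then 1 else 0)))
            (List.replicate (l.length + 1) (0 : Int))).getD i 0)) 0
      = bcG 0 (pcnt 'T' l) l 0 := by
  rw [PySem.List.foldl_congr_mem (List.range (l.length + 1)) _
      (fun acc i => max acc (pcnt 'L' (l.take i) * pcnt 'T' (l.drop i))) 0
      (by
        intro acc i hi
        rw [List.mem_range] at hi
        beta_reduce
        rw [FU_getD l i (by omega), FD_getD l i (by omega)])]
  rw [bcG_eq, List.range_succ_eq_map, List.foldl_cons, List.foldl_map]
  beta_reduce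
  have h0 : max (0 : Int) (pcnt 'L' (List.take 0 l) * pcnt 'T' (List.drop 0 l)) = 0 := by
    simp [pcnt]
  rw [h0]
  apply PySem.List.foldl_congr_mem
  intro acc i hi
  beta_reduce
  simp only [Nat.succ_eq_add_one]
  rw [zero_add, pcnt_drop]

theorem max_shift (a x y z : Int) :
    max (max (max a (a + x)) (a + y)) (a + z) = a + max (max (max 0 x) y) z := by
  simp only [max_def]
  split_ifs <;> omega

/-- value of A's else-branch -/
theorem A_body_val (l : List Char) :
    (let n := l.length
     let preL := (List.range n).foldl
        (fun a i => a.set (i + 1) (a.getD i 0 + (if l.getD i ' ' = 'L' then 1 else 0)))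
        (List.replicate (n + 1) (0 : Int))
     let sufT := ((List.range n).reverse).foldl
        (fun a i => a.set i (a.getD (i + 1) 0 + (if l.getD i ' ' = 'T' then 1 else 0)))
        (List.replicate (n + 1) (0 : Int))
     let lctNum := (List.range n).foldl
        (fun acc i => if l.getD i ' ' = 'C' then acc + preL.getD i 0 * sufT.getD i 0 else acc) 0
     let best := lctNum
     let addL := (List.range n).foldl
        (fun acc i => if l.getD i ' ' = 'C' then acc + sufT.getD i 0 else acc) 0
     let best := max best (lctNum + addL)
     let addT := (List.range n).foldl
        (fun acc i => if l.getD i ' ' = 'C' then acc + preL.getD i 0 else acc) 0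
     let best := max best (lctNum + addT)
     let addC := (List.range (n + 1)).foldl
        (fun acc i => max acc (preL.getD i 0 * sufT.getD i 0)) 0
     let best := max best (lctNum + addC)
     best)
    = sLCT l + max (max (max 0 (pcnt 'T' l * pcnt 'C' l - sPair 'T' 'C' l)) (sPair 'L' 'C' l))
        (bcG 0 (pcnt 'T' l) l 0) := by
  show max (max (max _ _) _) _ = _
  rw [loop_lct l, loop_addL l, loop_addT l, loop_addC l]
  have hid : pcnt 'T' l * pcnt 'C' l - sPair 'T' 'C' l = sPair 'C' 'T' l := by
    have h := sCT_add_sTC l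
    nlinarith [h]
  rw [hid]
  exact max_shift (sLCT l) (sPair 'C' 'T' l) (sPair 'L' 'C' l) (bcG 0 (pcnt 'T' l) l 0)

-- ===== VERDICT (by name: the statement is the Claim_ definition above) =====
theorem numOfSubsequences_spec : Claim_equal_numOfSubsequences := by
  intro s _
  unfold Spec_numOfSubsequences
  rw [alt_eq]
  simp only [numOfSubsequences]
  split
  · next h =>
      symm
      simp only [Bool.or_eq_true, Bool.and_eq_true, Bool.not_eq_true'] at h
      rcases h with (⟨hL, hC⟩ | ⟨hC, hT⟩) | ⟨hL, hT⟩
      · have hc := not_contains_of_guard _ _ hC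
        have hl := not_contains_of_guard _ _ hL
        rw [sLCT_zero_noL _ hl, sPair_zero_right 'T' 'C' _ hc, sPair_zero_right 'L' 'C' _ hc,
          bcG_zero_noL _ _ hl, hc]
        simp
      · have hc := not_contains_of_guard _ _ hC
        have ht := not_contains_of_guard _ _ hT
        rw [sLCT_zero_noC _ hc, sPair_zero_right 'T' 'C' _ hc, sPair_zero_right 'L' 'C' _ hc,
          bcG_zero_noT _ ht, hc]
        simp
      · have hl := not_contains_of_guard _ _ hL
        have ht := not_contains_of_guard _ _ hT
        rw [sLCT_zero_noL _ hl, sPair_zero_left 'T' 'C' _ ht, sPair_zero_left 'L' 'C' _ hl,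
          bcG_zero_noL _ _ hl, ht]
        simp
  · exact A_body_val s.toList
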